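-- pv_equiv track=rewrite | github.com/Arselena/higher-school | Level_0_5_v1.py | SynchronizingTables
-- ===== SOURCE A (Python) =====
-- def SynchronizingTables(N, ids, salary):
--     try:
--         assert type(N) is int and N >= 0  # Проверяем число N (целое, положительное)
--         assert N == len(ids) == len(salary)
--         for i in range(len(ids)):  # Проверяем, что массив -- неповторяющиеся цифры
--             for j in range(i+1, len(ids)):
--                 assert ids[i] != ids[j]
--         for i in range(len(ids)):
--             assert type(ids[i]) is int and ids[i] >= 0 # Проверяем Элемент массива (целое, положительное)
--         for i in range(len(salary)):
--             assert type(salary[i]) is int and salary[i] >= 0 # Проверяем Элемент массива (целое, положительное)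
--
--         # Быстрая сортировка массива и упорядочивания key
--         def partition(array, key, begin, end):
--             pivot = begin
--             for i in range(begin+1, end+1):
--                 if array[i] <= array[begin]:
--                     pivot += 1
--                     array[i], array[pivot] = array[pivot], array[i]
--                     if key != []:
--                         key[i], key[pivot] = key[pivot], key[i]
--             array[pivot], array[begin] = array[begin], array[pivot]
--             if key != []:
--                 key[pivot], key[begin] = key[begin], key[pivot]
--             return pivot
--
--         def quick_sort(array, key, begin=0, end=None):
--             if end is None:
--                 end = len(array) - 1
--
--             def _quicksort(array, key, begin, end):
--                 if begin >= end:
--                     return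
--                 pivot = partition(array, key, begin, end)
--                 _quicksort(array, key, begin, pivot-1)
--                 _quicksort(array, key, pivot+1, end)
--             return _quicksort(array, key, begin, end)
--
--         key = [i for i in range(1, N + 1)]
--         quick_sort(ids, key)
--         quick_sort(salary, [])
--         quick_sort(key, salary)
--         return salary
--
--     except AssertionError:
--         pass # Ничего не делать
-- ===== SOURCE B (Python) =====
-- def SynchronizingTables(N, ids, salary):
--     # Same result as the original, computed by argsort/rank instead of three quicksorts;
--     # unlike the original it does NOT sort ids/salary in place (return value is identical).
--     if not (type(N) is int and N >= 0 and N == len(ids) == len(salary)):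
--         return None
--     if len(set(ids)) != len(ids):
--         return None
--     if any(x < 0 for x in ids) or any(x < 0 for x in salary):
--         return None
--     sorted_salary = sorted(salary)
--     rank = {v: r for r, v in enumerate(sorted(ids))}
--     return [sorted_salary[rank[v]] for v in ids]
-- ===== Notes on version B (the rewrite author's own statement) =====
-- stated objective: alternative
-- what changed: Replaces the pairwise duplicate scan and the three in-place quicksorts (ids with a synchronized key array, salary, then the key array with salary) by a set-based distinctness check plus one rank dictionary built from sorted(ids) and a single indexed lookup into sorted(salary); B does not mutate its arguments (A sorts ids and salary in place), the return value is identical.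
import Mathlib
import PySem

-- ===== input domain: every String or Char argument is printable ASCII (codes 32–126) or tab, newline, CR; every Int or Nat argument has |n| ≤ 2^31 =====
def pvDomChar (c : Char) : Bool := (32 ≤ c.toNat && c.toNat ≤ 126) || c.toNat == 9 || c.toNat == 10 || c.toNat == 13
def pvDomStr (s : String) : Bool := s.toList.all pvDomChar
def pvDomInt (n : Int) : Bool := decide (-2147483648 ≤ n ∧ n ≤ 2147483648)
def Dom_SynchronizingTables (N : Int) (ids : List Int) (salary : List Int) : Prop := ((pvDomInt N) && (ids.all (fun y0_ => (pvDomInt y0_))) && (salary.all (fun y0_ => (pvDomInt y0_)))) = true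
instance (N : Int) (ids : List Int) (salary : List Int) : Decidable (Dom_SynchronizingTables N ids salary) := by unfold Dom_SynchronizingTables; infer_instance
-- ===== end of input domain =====

-- B computes the same table by a different algorithm: a set-based distinctness check, one
-- rank dictionary over sorted(ids) and indexed lookups into sorted(salary), instead of A's
-- pairwise duplicate scan and three synchronized in-place quicksorts.  A sorts ids and
-- salary in place while B does not mutate its arguments; the equivalence proved here is
-- about the return value only.


-- ===== PORT A =====
-- `array[i], array[j] = array[j], array[i]`.  Every swap A performs has both indices in
-- range, so the out-of-range identity fallback is never taken (Python would raise there).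
def swapL {α : Type} (xs : List α) (i j : Nat) : List α :=
  match xs[i]?, xs[j]? with
  | some xi, some xj => (xs.set i xj).set j xi
  | _, _ => xs

-- body of `for i in range(begin+1, end+1)` in `partition` (state: array, key, pivot);
-- all indices are nonnegative, so Nat indices are exact
def partStepA (b : Nat) (st : List Int × List Int × Nat) (i : Nat) : List Int × List Int × Nat :=
  if st.1.getD i 0 ≤ st.1.getD b 0 then
    (swapL st.1 i (st.2.2 + 1),
     if st.2.1 = [] then st.2.1 else swapL st.2.1 i (st.2.2 + 1),
     st.2.2 + 1)
  else st

def partitionA (a k : List Int) (b e : Nat) : List Int × List Int × Nat :=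
  let st := (List.range' (b + 1) (e - b)).foldl (partStepA b) (a, k, b)
  (swapL st.1 st.2.2 b,
   if st.2.1 = [] then st.2.1 else swapL st.2.1 st.2.2 b,
   st.2.2)

def qsAuxA : Nat → List Int → List Int → Nat → Nat → List Int × List Int
  | 0, a, k, _, _ => (a, k)
  | f + 1, a, k, b, e =>
    if e ≤ b then (a, k)
    else
      let pr := partitionA a k b e
      let m := qsAuxA f pr.1 pr.2.1 b (pr.2.2 - 1)
      qsAuxA f m.1 m.2 (pr.2.2 + 1) e

-- `quick_sort(array, key)` with the default begin=0, end=len(array)-1.  The fuel argument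
-- of qsAuxA only makes the recursion structural: the segment shrinks strictly at each
-- recursive call, so a fuel of len+1 is never exhausted.  Python's `begin >= end` guard is
-- `e ≤ b`; Nat's `pivot-1` at pivot = 0 is 0 where Python has -1: the guard returns
-- immediately in both cases.
def quickSortA (a k : List Int) : List Int × List Int :=
  qsAuxA (a.length + 1) a k 0 (a.length - 1)

-- A's guarded body: the chain of asserts (all pure tests, in A's order — the i<j double
-- loop over pairs is the Pairwise test), then the three quicksort calls on ids/key,
-- salary, key/salary; `except AssertionError: pass` returns None.
def SynchronizingTables (N : Int) (ids : List Int) (salary : List Int) : Option (List Int) :=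
  if 0 ≤ N ∧ N = PySem.List.len ids ∧ PySem.List.len ids = PySem.List.len salary
     ∧ List.Pairwise (· ≠ ·) ids
     ∧ (∀ x ∈ ids, 0 ≤ x) ∧ (∀ x ∈ salary, 0 ≤ x) then
    let key := PySem.List.pyRange 1 (N + 1) 1
    let r1 := quickSortA ids key
    let r2 := quickSortA salary []
    let r3 := quickSortA r1.2 r2.1
    some r3.2
  else none

-- ===== PORT B =====
def SynchronizingTables_alt (N : Int) (ids : List Int) (salary : List Int) : Option (List Int) :=
  if ¬ (0 ≤ N ∧ N = PySem.List.len ids ∧ N = PySem.List.len salary) then none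
  else if (PySem.Set.ofList ids).length ≠ ids.length then none  -- len(set(ids)) != len(ids)
  else if ids.any (fun x => decide (x < 0)) || salary.any (fun x => decide (x < 0)) then none
  else
    let ssal := PySem.List.sorted salary (fun x => x) false
    -- rank = {v: r for r, v in enumerate(sorted(ids))}
    let rank := (PySem.List.enumerate (PySem.List.sorted ids (fun x => x) false) 0).foldl
        (fun d p => d.insert p.2 p.1) PySem.Dict.empty
    -- sorted_salary[rank[v]]: rank[v] is always a valid index here
    some (ids.map (fun v => PySem.List.pyGetD ssal (rank.getD v 0) 0))

-- ===== PRECONDITION & SPEC =====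
def Spec_SynchronizingTables (N : Int) (ids : List Int) (salary : List Int) (out : Option (List Int)) : Prop := out = SynchronizingTables_alt N ids salary
instance (N : Int) (ids : List Int) (salary : List Int) (out : Option (List Int)) : Decidable (Spec_SynchronizingTables N ids salary out) := by unfold Spec_SynchronizingTables; infer_instance

-- ===== CLAIM (what is proved, stated in full; the proofs are below) =====
def Claim_equal_SynchronizingTables : Prop := ∀ (N : Int) (ids : List Int) (salary : List Int), Dom_SynchronizingTables N ids salary → Spec_SynchronizingTables N ids salary (SynchronizingTables N ids salary)

-- ===== LEMMAS AND PROOFS =====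
-- A's quicksort on the (array, key) pair is analysed through qsP, the same algorithm over
-- the zipped list; partitionP_loop/partitionP_spec/qsP_spec are the classical in-place
-- quicksort invariants, the bridge lemmas connect qsP to the two-list port qsAuxA.
theorem swapL_self {α : Type} (xs : List α) (i : Nat) : swapL xs i i = xs := by
  unfold swapL
  cases h : xs[i]? with
  | none => simp
  | some x =>
    simp only
    have hi : i < xs.length := by
      rcases Nat.lt_or_ge i xs.length with h' | h'
      · exact h'
      · rw [List.getElem?_eq_none h'] at h; cases h
    have hx : xs[i] = x := by simpa [List.getElem?_eq_getElem hi] using h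
    simp [← hx, List.set_getElem_self]
theorem swapL_comm {α : Type} (xs : List α) (i j : Nat) (hij : i ≠ j) :
    swapL xs i j = swapL xs j i := by
  unfold swapL
  cases hi : xs[i]? <;> cases hj : xs[j]? <;> simp
  exact List.set_comm _ _ hij
theorem swapL_split {α : Type} (A M B : List α) (u v : α) :
    swapL (A ++ u :: M ++ v :: B) A.length (A.length + 1 + M.length)
      = A ++ v :: M ++ u :: B := by
  have h1 : (A ++ u :: M ++ v :: B)[A.length]? = some u := by simp
  have h2 : (A ++ u :: M ++ v :: B)[A.length + 1 + M.length]? = some v := by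
    rw [show A ++ u :: M ++ v :: B = (A ++ u :: M) ++ v :: B by simp,
        List.getElem?_append_right (by simp; omega)]
    have : A.length + 1 + M.length - (A ++ u :: M).length = 0 := by simp; omega
    rw [this]; rfl
  unfold swapL
  rw [h1, h2]
  simp only
  rw [show (A ++ u :: M ++ v :: B).set A.length v = A ++ v :: M ++ v :: B by simp,
      show A ++ v :: M ++ v :: B = (A ++ v :: M) ++ v :: B by simp,
      List.set_append]
  have hlen : (A ++ v :: M).length = A.length + 1 + M.length := by simp; omega
  rw [if_neg (by omega), hlen]
  simp
theorem getD_at {α : Type} (A B : List α) (x : α) (d : α) :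
    (A ++ x :: B).getD A.length d = x := by
  simp [List.getD_eq_getElem?_getD]

def partStepP (b : Nat) (st : List (Int × Int) × Nat) (i : Nat) : List (Int × Int) × Nat :=
  if (st.1.getD i (0, 0)).1 ≤ (st.1.getD b (0, 0)).1 then (swapL st.1 i (st.2 + 1), st.2 + 1)
  else st

theorem partitionP_loop (b : Nat) (P S : List (Int × Int)) (pv : Int × Int) (hP : P.length = b) :
    ∀ n, n ≤ S.length →
      ∃ L R : List (Int × Int),
        (List.range' (b + 1) n).foldl (partStepP b) (P ++ pv :: S, b)
          = (P ++ pv :: (L ++ R) ++ S.drop n, b + L.length) ∧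
        (L ++ R).Perm (S.take n) ∧ (∀ x ∈ L, x.1 ≤ pv.1) ∧ (∀ x ∈ R, pv.1 < x.1) := by
  intro n
  induction n with
  | zero => intro _; exact ⟨[], [], by simp, by simp, by simp, by simp⟩
  | succ n ih =>
    intro hn
    obtain ⟨L, R, hst, hperm, hL, hR⟩ := ih (by omega)
    have hnlen : n < S.length := by omega
    have hLR : (L ++ R).length = n := by
      have := hperm.length_eq; simpa [List.length_take, Nat.min_eq_left (le_of_lt hnlen)] using this
    have hdrop : S.drop n = S[n] :: S.drop (n + 1) := (List.getElem_cons_drop hnlen).symm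
    set x := S[n] with hx
    have hcur : P ++ pv :: (L ++ R) ++ S.drop n
        = (P ++ pv :: (L ++ R)) ++ x :: S.drop (n + 1) := by
      rw [hdrop]
    rw [List.range'_concat, List.foldl_append, hst]
    simp only [List.foldl_cons, List.foldl_nil]
    unfold partStepP
    simp only
    have hgi : ((P ++ pv :: (L ++ R) ++ S.drop n).getD (b + 1 + 1 * n) (0,0)) = x := by
      rw [hcur]
      have : b + 1 + 1 * n = (P ++ pv :: (L ++ R)).length := by
        simp [hP, hLR]; omega
      rw [this, getD_at]
    have hgb : ((P ++ pv :: (L ++ R) ++ S.drop n).getD b (0,0)) = pv := by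
      have : P ++ pv :: (L ++ R) ++ S.drop n = P ++ pv :: ((L ++ R) ++ S.drop n) := by simp
      rw [this, ← hP, getD_at]
    rw [hgi, hgb]
    have htake : S.take (n + 1) = S.take n ++ [x] := List.take_succ_eq_append_getElem hnlen
    by_cases hcmp : x.1 ≤ pv.1
    · rw [if_pos hcmp]
      rcases R with _ | ⟨r, R'⟩
      · -- R empty: swap with itself
        have hidx : b + 1 + 1 * n = b + L.length + 1 := by simp at hLR ⊢; omega
        refine ⟨L ++ [x], [], ?_, ?_, ?_, by simp⟩
        · rw [hidx, hcur, swapL_self]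
          exact Prod.ext (by simp) (by simp; omega)
        · rw [htake]
          refine List.Perm.trans ?_ (hperm.append_right [x])
          simp
        · intro y hy
          rcases List.mem_append.1 hy with h | h
          · exact hL y h
          · simp at h; subst h; exact hcmp
      · -- R = r :: R': swap x with r
        have hidx2 : b + 1 + 1 * n = (P ++ pv :: L).length + 1 + R'.length := by
          simp [hP] at hLR ⊢; omega
        have hre : P ++ pv :: (L ++ r :: R') ++ S.drop n
            = (P ++ pv :: L) ++ r :: R' ++ x :: S.drop (n + 1) := by
          rw [hdrop]; simp
        have hpl : b + L.length + 1 = (P ++ pv :: L).length := by simp [hP]; omega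
        refine ⟨L ++ [x], R' ++ [r], ?_, ?_, ?_, ?_⟩
        · rw [hidx2, hre, hpl]
          rw [swapL_comm _ _ _ (by simp [hP]; omega), ← hpl, hpl, swapL_split]
          exact Prod.ext (by simp) (by simp; omega)
        · rw [htake]
          refine List.Perm.trans ?_ (hperm.append_right [x])
          rw [List.perm_iff_count]; intro a
          simp [List.count_append, List.count_cons]; omega
        · intro y hy
          rcases List.mem_append.1 hy with h | h
          · exact hL y h
          · simp at h; subst h; exact hcmp
        · intro y hy
          rcases List.mem_append.1 hy with h | h
          · exact hR y (by simp [h])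
          · simp at h; subst h; exact hR _ (by simp)
    · rw [if_neg hcmp]
      refine ⟨L, R ++ [x], ?_, ?_, hL, ?_⟩
      · rw [hdrop]
        exact Prod.ext (by simp) rfl
      · rw [htake]
        refine List.Perm.trans ?_ (hperm.append_right [x])
        simp
      · intro y hy
        rcases List.mem_append.1 hy with h | h
        · exact hR y h
        · simp at h; subst h; exact lt_of_not_ge hcmp

def partitionP' (l : List (Int × Int)) (b e : Nat) : List (Int × Int) × Nat :=
  let st := (List.range' (b + 1) (e - b)).foldl (partStepP b) (l, b)
  (swapL st.1 st.2 b, st.2)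

theorem partitionP_spec (l : List (Int × Int)) (b e : Nat) (hbe : b ≤ e) (he : e < l.length) :
    ∃ (L R : List (Int × Int)) (pv : Int × Int),
      partitionP' l b e = (l.take b ++ (L ++ pv :: R) ++ l.drop (e + 1), b + L.length) ∧
      (L ++ pv :: R).Perm ((l.drop b).take (e + 1 - b)) ∧
      (∀ x ∈ L, x.1 ≤ pv.1) ∧ (∀ x ∈ R, pv.1 < x.1) := by
  have hb : b < l.length := by omega
  set P := l.take b with hPdef
  set pv := l[b] with hpvdef
  set S := l.drop (b + 1) with hSdef
  have hPl : P.length = b := by simp [hPdef]; omega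
  have hl : l = P ++ pv :: S := by
    rw [hPdef, hpvdef, hSdef]
    rw [List.getElem_cons_drop hb, List.take_append_drop]
  have hSlen : S.length = l.length - (b + 1) := by simp [hSdef]
  have hn0 : e - b ≤ S.length := by omega
  obtain ⟨L, R, hst, hperm, hL, hR⟩ := partitionP_loop b P S pv hPl (e - b) hn0
  have hdropE : l.drop (e + 1) = S.drop (e - b) := by
    rw [hSdef, List.drop_drop]
    congr 1; omega
  have hslice : (l.drop b).take (e + 1 - b) = pv :: S.take (e - b) := by
    rw [show l.drop b = pv :: S by rw [hpvdef, hSdef, List.getElem_cons_drop hb]]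
    rw [show e + 1 - b = (e - b) + 1 by omega]
    rfl
  unfold partitionP'
  rw [show (l, b) = (P ++ pv :: S, b) by rw [← hl], hst]
  simp only
  rcases List.eq_nil_or_concat L with hLnil | ⟨M, z, hLc⟩
  · subst hLnil
    refine ⟨[], R, pv, ?_, ?_, by simp, hR⟩
    · rw [show b + List.length ([] : List (Int × Int)) = b by simp, swapL_self, hdropE]
      exact Prod.ext (by simp) (by simp)
    · rw [hslice]
      simpa using hperm.cons pv
  · subst hLc
    have hlen : (M.concat z).length = M.length + 1 := by simp
    refine ⟨z :: M, R, pv, ?_, ?_, ?_, hR⟩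
    · rw [hlen]
      have h1 : P ++ pv :: (M.concat z ++ R) ++ S.drop (e - b)
          = P ++ pv :: M ++ z :: (R ++ S.drop (e - b)) := by simp
      rw [h1, swapL_comm _ _ _ (by simp)]
      rw [show b + (M.length + 1) = P.length + 1 + M.length by omega, show b = P.length from hPl.symm]
      rw [swapL_split, hdropE]
      exact Prod.ext (by simp [hPl]) (by simp; omega)
    · rw [hslice]
      have h2 : ((z :: M) ++ pv :: R).Perm (pv :: ((z :: M) ++ R)) := List.perm_middle
      refine h2.trans (List.Perm.cons pv ?_)
      refine List.Perm.trans ?_ hperm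
      rw [List.perm_iff_count]; intro a
      simp [List.count_append, List.count_cons]; omega
    · intro y hy
      refine hL y ?_
      rcases List.mem_cons.1 hy with h | h
      · subst h; simp
      · simp [h]

def qsP : Nat → List (Int × Int) → Nat → Nat → List (Int × Int)
  | 0, l, _, _ => l
  | f + 1, l, b, e =>
    if e ≤ b then l
    else
      let pr := partitionP' l b e
      qsP f (qsP f pr.1 b (pr.2 - 1)) (pr.2 + 1) e

theorem qsP_id (f : Nat) (l : List (Int × Int)) (b e : Nat) (h : e ≤ b) : qsP f l b e = l := by
  cases f with
  | zero => rfl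
  | succ f => unfold qsP; rw [if_pos h]

theorem qsP_spec : ∀ (f : Nat) (l : List (Int × Int)) (b e : Nat), b ≤ e → e < l.length →
    e - b < f →
    ∃ mid : List (Int × Int),
      mid.Perm ((l.drop b).take (e + 1 - b)) ∧
      mid.Pairwise (fun x y => x.1 ≤ y.1) ∧
      qsP f l b e = l.take b ++ mid ++ l.drop (e + 1) := by
  intro f
  induction f with
  | zero => intro l b e _ _ h; omega
  | succ f ih =>
    intro l b e hbe he hf
    by_cases heb : e ≤ b
    · -- single element segment
      have hbeq : b = e := by omega
      subst hbeq
      refine ⟨[l[b]], by rw [show b + 1 - b = 1 by omega]; simp [List.take_one_drop_eq_of_lt_length he], by simp, ?_⟩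
      unfold qsP
      rw [if_pos le_rfl]
      rw [show l.take b ++ [l[b]] ++ l.drop (b+1) = l.take b ++ (l[b] :: l.drop (b+1)) by simp]
      rw [List.getElem_cons_drop he, List.take_append_drop]
    · have hbe' : b < e := by omega
      obtain ⟨L, R, pv, hpart, hperm, hL, hR⟩ := partitionP_spec l b e hbe he
      have hslicelen : (L ++ pv :: R).length = e + 1 - b := by
        rw [hperm.length_eq]; simp; omega
      have hLlen : L.length + 1 + R.length = e + 1 - b := by
        have := hslicelen; simp at this; omega
      unfold qsP
      rw [if_neg heb, hpart]
      simp only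
      set p := b + L.length with hp
      set D := l.drop (e + 1) with hD
      set l1 := l.take b ++ (L ++ pv :: R) ++ D with hl1def
      have hl1 : l1.length = l.length := by
        rw [hl1def]; simp [hD]; omega
      -- left recursive call
      have hleft : ∃ midL : List (Int × Int),
          midL.Perm L ∧ midL.Pairwise (fun x y => x.1 ≤ y.1) ∧
          qsP f l1 b (p - 1) = l.take b ++ midL ++ (pv :: (R ++ D)) := by
        rcases List.eq_nil_or_concat L with hLnil | ⟨M, z, hLc⟩
        · refine ⟨[], by simp [hLnil], by simp, ?_⟩
          rw [qsP_id f l1 b (p-1) (by simp [hp, hLnil])]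
          rw [hl1def, hLnil]; simp
        · have hLpos : 0 < L.length := by rw [hLc]; simp
          have hb_le : b ≤ p - 1 := by omega
          have hlt : p - 1 < l1.length := by omega
          have hfuel : p - 1 - b < f := by omega
          obtain ⟨midL, hmLperm, hmLpair, hmLeq⟩ := ih l1 b (p - 1) hb_le hlt hfuel
          have htake : l1.take b = l.take b := by
            rw [hl1def, show l.take b ++ (L ++ pv :: R) ++ D = l.take b ++ ((L ++ pv :: R) ++ D) by simp]
            exact List.take_left' (by simp [List.length_take]; omega)
          have hdropb : l1.drop b = L ++ (pv :: (R ++ D)) := by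
            rw [hl1def, show l.take b ++ (L ++ pv :: R) ++ D = l.take b ++ (L ++ pv :: (R ++ D)) by simp]
            exact List.drop_left' (by simp [List.length_take]; omega)
          have hslice1 : (l1.drop b).take (p - 1 + 1 - b) = L := by
            rw [hdropb, show p - 1 + 1 - b = L.length by omega]
            exact List.take_left' rfl
          have hdropp : l1.drop (p - 1 + 1) = pv :: (R ++ D) := by
            rw [hl1def, show l.take b ++ (L ++ pv :: R) ++ D = (l.take b ++ L) ++ (pv :: (R ++ D)) by simp]
            exact List.drop_left' (by simp [List.length_take]; omega)
          rw [hslice1] at hmLperm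
          rw [htake, hdropp] at hmLeq
          exact ⟨midL, hmLperm, hmLpair, hmLeq⟩
      obtain ⟨midL, hmLperm, hmLpair, hmLeq⟩ := hleft
      have hmLlen : midL.length = L.length := hmLperm.length_eq
      set l2 := l.take b ++ midL ++ (pv :: (R ++ D)) with hl2def
      have hl2len : l2.length = l.length := by
        rw [hl2def]; simp [hmLlen, hD]; omega
      -- right recursive call
      have hright : ∃ midR : List (Int × Int),
          midR.Perm R ∧ midR.Pairwise (fun x y => x.1 ≤ y.1) ∧
          qsP f l2 (p + 1) e = l.take b ++ (midL ++ pv :: midR) ++ D := by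
        rcases List.eq_nil_or_concat R with hRnil | ⟨M, z, hRc⟩
        · refine ⟨[], by simp [hRnil], by simp, ?_⟩
          rw [qsP_id f l2 (p+1) e (by have := hLlen; rw [hRnil] at this; simp at this; omega)]
          rw [hl2def, hRnil]; simp
        · have hRpos : 0 < R.length := by rw [hRc]; simp
          have hple : p + 1 ≤ e := by omega
          have hlt : e < l2.length := by omega
          have hfuel : e - (p + 1) < f := by omega
          obtain ⟨midR, hmRperm, hmRpair, hmReq⟩ := ih l2 (p + 1) e hple hlt hfuel
          have htake2 : l2.take (p + 1) = l.take b ++ midL ++ [pv] := by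
            rw [hl2def, show l.take b ++ midL ++ (pv :: (R ++ D)) = (l.take b ++ midL ++ [pv]) ++ (R ++ D) by simp]
            exact List.take_left' (by simp [List.length_take, hmLlen]; omega)
          have hdropp1 : l2.drop (p + 1) = R ++ D := by
            rw [hl2def, show l.take b ++ midL ++ (pv :: (R ++ D)) = (l.take b ++ midL ++ [pv]) ++ (R ++ D) by simp]
            exact List.drop_left' (by simp [List.length_take, hmLlen]; omega)
          have hslice2 : (l2.drop (p + 1)).take (e + 1 - (p + 1)) = R := by
            rw [hdropp1, show e + 1 - (p + 1) = R.length by omega]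
            exact List.take_left' rfl
          have hdrope1 : l2.drop (e + 1) = D := by
            rw [hl2def, show l.take b ++ midL ++ (pv :: (R ++ D)) = (l.take b ++ midL ++ pv :: R) ++ D by simp]
            exact List.drop_left' (by simp [List.length_take, hmLlen]; omega)
          rw [hslice2] at hmRperm
          rw [htake2, hdrope1] at hmReq
          refine ⟨midR, hmRperm, hmRpair, ?_⟩
          rw [hmReq]; simp
      obtain ⟨midR, hmRperm, hmRpair, hmReq⟩ := hright
      refine ⟨midL ++ pv :: midR, ?_, ?_, ?_⟩
      · refine List.Perm.trans ?_ hperm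
        exact (hmLperm.append ((hmRperm).cons pv))
      · rw [List.pairwise_append]
        refine ⟨hmLpair, ?_, ?_⟩
        · rw [List.pairwise_cons]
          refine ⟨fun y hy => ?_, hmRpair⟩
          exact le_of_lt (hR y (hmRperm.mem_iff.mp hy))
        · intro x hx y hy
          have hx' : x.1 ≤ pv.1 := hL x (hmLperm.mem_iff.mp hx)
          rcases List.mem_cons.1 hy with h | h
          · subst h; exact hx'
          · exact le_trans hx' (le_of_lt (hR y (hmRperm.mem_iff.mp h)))
      · rw [hmLeq, hmReq]

theorem getD_map_fst (l : List (Int × Int)) (i : Nat) :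
    (l.map Prod.fst).getD i 0 = (l.getD i (0, 0)).1 := by
  simp [List.getD_eq_getElem?_getD, List.getElem?_map]
  cases l[i]? <;> simp

theorem swapL_map {α β : Type} (f : α → β) (l : List α) (i j : Nat) :
    swapL (l.map f) i j = (swapL l i j).map f := by
  unfold swapL
  cases hi : l[i]? <;> cases hj : l[j]? <;>
    simp [List.getElem?_map, hi, hj, List.map_set]

-- one partition step tracks the zipped version
theorem partStepA_bridge (b : Nat) (l : List (Int × Int)) (p : Nat) (i : Nat) (hne : l ≠ []) :
    partStepA b (l.map Prod.fst, l.map Prod.snd, p) i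
      = ((partStepP b (l, p) i).1.map Prod.fst, (partStepP b (l, p) i).1.map Prod.snd,
         (partStepP b (l, p) i).2) := by
  unfold partStepA partStepP
  simp only [getD_map_fst]
  by_cases hc : (l.getD i (0,0)).1 ≤ (l.getD b (0,0)).1
  · rw [if_pos hc, if_pos hc]
    simp only [swapL_map]
    rw [if_neg (by simpa using hne)]
  · rw [if_neg hc, if_neg hc]

theorem partloop_bridge (b : Nat) : ∀ (idx : List Nat) (l : List (Int × Int)) (p : Nat),
    idx.foldl (partStepA b) (l.map Prod.fst, l.map Prod.snd, p)
      = ((idx.foldl (partStepP b) (l, p)).1.map Prod.fst,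
         (idx.foldl (partStepP b) (l, p)).1.map Prod.snd,
         (idx.foldl (partStepP b) (l, p)).2) := by
  intro idx
  induction idx with
  | nil => intro l p; rfl
  | cons i t ihx =>
    intro l p
    rcases l with _ | ⟨x, l'⟩
    · -- empty list: both steps keep the list empty
      have hA : partStepA b (([] : List Int), ([] : List Int), p) i = ([], [], p + 1) := by
        unfold partStepA swapL; simp
      have hPP : partStepP b (([] : List (Int × Int)), p) i = ([], p + 1) := by
        unfold partStepP swapL; simp
      simp only [List.foldl_cons, hA, hPP]
      simpa using ihx [] (p + 1)
    · rw [List.foldl_cons, List.foldl_cons, partStepA_bridge b (x :: l') p i (by simp)]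
      exact ihx _ _

theorem partitionA_bridge (l : List (Int × Int)) (b e : Nat) :
    partitionA (l.map Prod.fst) (l.map Prod.snd) b e
      = ((partitionP' l b e).1.map Prod.fst, (partitionP' l b e).1.map Prod.snd,
         (partitionP' l b e).2) := by
  unfold partitionA partitionP'
  rw [partloop_bridge]
  set st := (List.range' (b + 1) (e - b)).foldl (partStepP b) (l, b) with hst
  simp only
  rcases hres : st.1 with _ | ⟨x, t⟩
  · simp [swapL]
  · rw [if_neg (by simp [hres]), swapL_map, swapL_map]

theorem qsAuxA_bridge : ∀ (f : Nat) (l : List (Int × Int)) (b e : Nat),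
    qsAuxA f (l.map Prod.fst) (l.map Prod.snd) b e
      = ((qsP f l b e).map Prod.fst, (qsP f l b e).map Prod.snd) := by
  intro f
  induction f with
  | zero => intro l b e; rfl
  | succ f ih =>
    intro l b e
    unfold qsAuxA qsP
    by_cases h : e ≤ b
    · rw [if_pos h, if_pos h]
    · rw [if_neg h, if_neg h]
      simp only [partitionA_bridge l b e, ih]

theorem stepA_indep (b : Nat) (a k k' : List Int) (p i : Nat) :
    (partStepA b (a, k, p) i).1 = (partStepA b (a, k', p) i).1
    ∧ (partStepA b (a, k, p) i).2.2 = (partStepA b (a, k', p) i).2.2 := by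
  unfold partStepA
  split_ifs <;> simp

theorem loopA_indep (b : Nat) : ∀ (idx : List Nat) (a k k' : List Int) (p : Nat),
    (idx.foldl (partStepA b) (a, k, p)).1 = (idx.foldl (partStepA b) (a, k', p)).1
    ∧ (idx.foldl (partStepA b) (a, k, p)).2.2 = (idx.foldl (partStepA b) (a, k', p)).2.2 := by
  intro idx
  induction idx with
  | nil => intro a k k' p; exact ⟨rfl, rfl⟩
  | cons i t ihx =>
    intro a k k' p
    rw [List.foldl_cons, List.foldl_cons]
    obtain ⟨h1, h2⟩ := stepA_indep b a k k' p i
    set s1 := partStepA b (a, k, p) i with hs1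
    set s2 := partStepA b (a, k', p) i with hs2
    have H := ihx s1.1 s1.2.1 s2.2.1 s1.2.2
    have hrepl : ((s1.1 : List Int), s2.2.1, s1.2.2) = s2 :=
      Prod.ext h1 (Prod.ext rfl h2)
    rw [hrepl] at H
    exact H

theorem partitionA_indep (a k k' : List Int) (b e : Nat) :
    (partitionA a k b e).1 = (partitionA a k' b e).1
    ∧ (partitionA a k b e).2.2 = (partitionA a k' b e).2.2 := by
  unfold partitionA
  obtain ⟨h1, h2⟩ := loopA_indep b (List.range' (b+1) (e-b)) a k k' b
  simp only
  rw [h1, h2]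
  exact ⟨rfl, rfl⟩

theorem qsAuxA_fst_indep : ∀ (f : Nat) (a k k' : List Int) (b e : Nat),
    (qsAuxA f a k b e).1 = (qsAuxA f a k' b e).1 := by
  intro f
  induction f with
  | zero => intro a k k' b e; rfl
  | succ f ih =>
    intro a k k' b e
    unfold qsAuxA
    by_cases h : e ≤ b
    · rw [if_pos h, if_pos h]
    · rw [if_neg h, if_neg h]
      simp only
      obtain ⟨h1, h2⟩ := partitionA_indep a k k' b e
      rw [← h1, ← h2]
      have hm : (qsAuxA f (partitionA a k b e).1 (partitionA a k b e).2.1 b ((partitionA a k b e).2.2 - 1)).1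
          = (qsAuxA f (partitionA a k b e).1 (partitionA a k' b e).2.1 b ((partitionA a k b e).2.2 - 1)).1 :=
        ih _ _ _ _ _
      rw [← hm]
      exact ih _ _ _ _ _

theorem quickSortA_pairs (a k : List Int) (h : k.length = a.length) :
    ∃ mid : List (Int × Int),
      mid.Perm (a.zip k) ∧ mid.Pairwise (fun x y => x.1 ≤ y.1) ∧
      quickSortA a k = (mid.map Prod.fst, mid.map Prod.snd) := by
  set l := a.zip k with hl
  have hfst : l.map Prod.fst = a := List.map_fst_zip (by omega)
  have hsnd : l.map Prod.snd = k := List.map_snd_zip (by omega)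
  have hlen : l.length = a.length := by simp [hl]; omega
  unfold quickSortA
  rcases Nat.eq_zero_or_pos a.length with hn | hn
  · have ha : a = [] := List.length_eq_zero_iff.mp hn
    have hk : k = [] := List.length_eq_zero_iff.mp (by omega)
    refine ⟨[], by simp [hl, ha], by simp, ?_⟩
    subst ha hk
    rfl
  · obtain ⟨mid, hperm, hpair, heq⟩ :=
      qsP_spec (a.length + 1) l 0 (a.length - 1) (by omega) (by omega) (by omega)
    refine ⟨mid, ?_, hpair, ?_⟩
    · refine hperm.trans ?_
      rw [List.drop_zero, show a.length - 1 + 1 - 0 = l.length by omega, List.take_length]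
    · rw [← hfst, ← hsnd, qsAuxA_bridge, hfst]
      rw [show a.length = l.length from hlen.symm] at heq ⊢
      rw [heq]
      simp [show l.length - 1 + 1 = l.length by omega]

theorem quickSortA_fst_sorted (a k : List Int) :
    (quickSortA a k).1 = PySem.List.sorted a (fun x => x) false := by
  have hind : (quickSortA a k).1 = (quickSortA a a).1 := qsAuxA_fst_indep _ a k a 0 _
  obtain ⟨mid, hperm, hpair, heq⟩ := quickSortA_pairs a a rfl
  rw [hind, heq]
  simp only
  refine (PySem.List.sorted_id_eq_of_perm_of_pairwise a (mid.map Prod.fst) ?_ ?_).symm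
  · have := hperm.map Prod.fst
    rwa [List.map_fst_zip (le_refl a.length)] at this
  · exact List.pairwise_map.mpr hpair

theorem ofList_sublist (xs : List Int) : (PySem.Set.ofList xs).Sublist xs := by
  induction xs using List.reverseRecOn with
  | nil => simp [PySem.Set.ofList_nil]
  | append_singleton t x ih =>
    rw [PySem.Set.ofList_append_singleton, PySem.Set.add_eq_ite]
    by_cases hx : x ∈ PySem.Set.ofList t
    · rw [if_pos hx]
      exact ih.trans (List.sublist_append_left t [x])
    · rw [if_neg hx]
      exact ih.append (List.Sublist.refl [x])

theorem ofList_length_iff (xs : List Int) :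
    (PySem.Set.ofList xs).length = xs.length ↔ xs.Nodup := by
  constructor
  · intro h
    have := (ofList_sublist xs).eq_of_length h
    rw [← this]
    exact PySem.Set.nodup_ofList xs
  · intro h
    rw [PySem.Set.ofList_eq_self_of_nodup xs h]

theorem rank_dict_getD (sids : List Int) (hnd : sids.Nodup) (r : Nat) (hr : r < sids.length) :
    ((PySem.List.enumerate sids 0).foldl (fun d p => d.insert p.2 p.1) PySem.Dict.empty).getD
      sids[r] 0 = (r : Int) := by
  set d := (PySem.List.enumerate sids 0).foldl (fun d p => d.insert p.2 p.1) PySem.Dict.empty with hd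
  have hmapk : (PySem.List.enumerate sids 0).map (fun p => p.2) = sids :=
    PySem.List.map_snd_enumerate sids 0
  have hitems : d.items = [] ++ (PySem.List.enumerate sids 0).map (fun p => (p.2, p.1)) := by
    rw [hd]
    exact PySem.Dict.items_foldl_insert_fresh (PySem.List.enumerate sids 0)
      (fun p => p.2) (fun p => p.1) PySem.Dict.empty
      (fun a _ => by simp [PySem.Dict.contains_empty])
      (by rw [hmapk]; exact hnd)
  have hkeys : d.keys.Nodup := by
    have : d.keys = (d.items).map Prod.fst := rfl
    rw [this, hitems]
    simp only [List.nil_append, List.map_map]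
    have h2 : ((PySem.List.enumerate sids 0).map ((Prod.fst : Int × Int → Int) ∘ (fun p => (p.2, p.1)))) = sids := by
      rw [show ((Prod.fst : Int × Int → Int) ∘ (fun p => (p.2, p.1))) = (fun p : Int × Int => p.2) from rfl]
      exact hmapk
    rw [h2]; exact hnd
  have hmem : ((sids[r] : Int), (r : Int)) ∈ d.items := by
    rw [hitems]
    simp only [List.nil_append, List.mem_map]
    refine ⟨((r : Int), sids[r]), ?_, rfl⟩
    rw [PySem.List.mem_enumerate_iff]
    exact ⟨r, hr, by simp⟩
  exact PySem.Dict.getD_of_mem_items d hmem hkeys 0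

theorem pairwise_lt_of_le_nodup (l : List Int) (h1 : l.Pairwise (· ≤ ·)) (h2 : l.Nodup) :
    l.Pairwise (· < ·) := by
  have := h1.and h2
  exact this.imp (fun ⟨a, b⟩ => lt_of_le_of_ne a b)

theorem valid_case (N : Int) (ids salary : List Int)
    (h1 : N = PySem.List.len ids) (h2 : PySem.List.len ids = PySem.List.len salary)
    (hnd : ids.Nodup) :
    (quickSortA (quickSortA ids (PySem.List.pyRange 1 (N + 1) 1)).2 (quickSortA salary []).1).2
      = ids.map (fun v =>
          PySem.List.pyGetD (PySem.List.sorted salary (fun x => x) false)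
            (((PySem.List.enumerate (PySem.List.sorted ids (fun x => x) false) 0).foldl
                (fun d p => d.insert p.2 p.1) PySem.Dict.empty).getD v 0) 0) := by
  set n := ids.length with hn
  have hsallen : salary.length = n := by simp [PySem.List.len_eq] at h2; omega
  set key0 := PySem.List.pyRange 1 (N + 1) 1 with hkey0
  have hNn : N = (n : Int) := by simpa [PySem.List.len_eq] using h1
  have hkey0len : key0.length = n := by
    rw [hkey0, PySem.List.length_pyRange_one, hNn]
    omega
  have hkey0nd : key0.Nodup := PySem.List.nodup_pyRange_one 1 (N + 1)
  have hkey0lt : key0.Pairwise (· < ·) := PySem.List.pairwise_lt_pyRange_one 1 (N + 1)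
  have hkey0get : ∀ (k : Nat) (hk : k < key0.length), key0[k] = 1 + (k : Int) := by
    intro k hk
    exact PySem.List.getElem_pyRange_one 1 (N + 1) k hk
  obtain ⟨mid1, hperm1, hpair1, heq1⟩ := quickSortA_pairs ids key0 (by omega)
  have hmid1len : mid1.length = n := by
    rw [hperm1.length_eq, List.length_zip, hkey0len]; omega
  set ssal := PySem.List.sorted salary (fun x => x) false with hssal
  have hssallen : ssal.length = n := by
    rw [hssal, PySem.List.length_sorted]; omega
  have hsal1 : (quickSortA salary []).1 = ssal := quickSortA_fst_sorted salary []
  set key1 := mid1.map Prod.snd with hkey1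
  have hkey1len : key1.length = n := by simp [hkey1, hmid1len]
  obtain ⟨mid3, hperm3, hpair3, heq3⟩ := quickSortA_pairs key1 ssal (by omega)
  have hmid3len : mid3.length = n := by
    rw [hperm3.length_eq, List.length_zip]; omega
  rw [heq1, hsal1]
  simp only
  rw [heq3]
  simp only
  set sids := PySem.List.sorted ids (fun x => x) false with hsids
  have hidsperm : (mid1.map Prod.fst).Perm ids := by
    have := hperm1.map Prod.fst
    rwa [List.map_fst_zip (by omega)] at this
  have hids1 : sids = mid1.map Prod.fst :=
    PySem.List.sorted_id_eq_of_perm_of_pairwise ids _ hidsperm (List.pairwise_map.mpr hpair1)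
  have hsidsnd : sids.Nodup := by
    rw [hids1]; exact hidsperm.nodup_iff.mpr hnd
  have hsidslen : sids.length = n := by simp [hids1, hmid1len]
  have hkey1perm : key1.Perm key0 := by
    have := hperm1.map Prod.snd
    rwa [List.map_snd_zip (by omega)] at this
  set key2 := mid3.map Prod.fst with hkey2
  have hkey2perm : key2.Perm key1 := by
    have := hperm3.map Prod.fst
    rwa [List.map_fst_zip (by omega)] at this
  have hkey2eq : key2 = key0 := by
    have e1 : PySem.List.sorted key1 (fun x => x) false = key0 :=
      PySem.List.sorted_eq_of_perm_of_pairwise_lt key1 key0 _ hkey1perm.symm hkey0lt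
    have hnd2 : key2.Nodup := (hkey2perm.trans hkey1perm).nodup_iff.mpr hkey0nd
    have e2 : PySem.List.sorted key1 (fun x => x) false = key2 :=
      PySem.List.sorted_eq_of_perm_of_pairwise_lt key1 key2 _ hkey2perm
        (pairwise_lt_of_le_nodup key2 (List.pairwise_map.mpr hpair3) hnd2)
    rw [← e1, e2]
  apply List.ext_getElem
  · simp [hmid3len, hn]
  intro p hp1 hp2
  have hpn : p < n := by simpa [hmid3len] using hp1
  have hp3 : p < mid3.length := by omega
  have hmem3 : mid3[p] ∈ key1.zip ssal := hperm3.mem_iff.mp (List.getElem_mem hp3)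
  obtain ⟨r, hrlt, hzr⟩ := List.mem_iff_getElem.mp hmem3
  have hrn : r < n := by have := hrlt; simp [List.length_zip, hkey1len, hssallen] at this; omega
  have hr1 : r < key1.length := by omega
  have hrs : r < ssal.length := by omega
  have hzr' : (key1[r], ssal[r]) = mid3[p] := by
    rw [← hzr]; exact List.getElem_zip.symm
  have hkey1r : key1[r] = 1 + (p : Int) := by
    have ha : (mid3[p]).1 = key2[p]'(by simp [hkey2]; omega) := (List.getElem_map Prod.fst).symm
    have hb : key2[p]'(by simp [hkey2]; omega) = key0[p]'(by omega) := by
      simp only [hkey2eq]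
    rw [show key1[r] = (mid3[p]).1 by rw [← hzr'], ha, hb]
    exact hkey0get p (by omega)
  have hrm1 : r < mid1.length := by omega
  have hmem1 : mid1[r] ∈ ids.zip key0 := hperm1.mem_iff.mp (List.getElem_mem hrm1)
  obtain ⟨j, hjlt, hzj⟩ := List.mem_iff_getElem.mp hmem1
  have hjn : j < n := by have := hjlt; simp [List.length_zip, hkey0len] at this; omega
  have hzj' : (ids[j]'(by omega), key0[j]'(by omega)) = mid1[r] := by
    rw [← hzj]; exact List.getElem_zip.symm
  have hmid1r2 : (mid1[r]).2 = key1[r] := (List.getElem_map Prod.snd).symm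
  have hjp : j = p := by
    have hk0j : key0[j]'(by omega) = 1 + (j : Int) := hkey0get j (by omega)
    have h' : (1 : Int) + (j : Int) = 1 + (p : Int) := by
      rw [← hk0j, show key0[j]'(by omega) = (mid1[r]).2 by rw [← hzj'], hmid1r2, hkey1r]
    have : (j : Int) = (p : Int) := by omega
    exact_mod_cast this
  have hidp : ids[p]'(by omega) = sids[r]'(by omega) := by
    have hc : sids[r]'(by omega) = (mid1.map Prod.fst)[r]'(by simp [hmid1len]; omega) := by
      simp only [hids1]
    have hd : (mid1.map Prod.fst)[r]'(by simp [hmid1len]; omega) = (mid1[r]).1 :=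
      List.getElem_map Prod.fst
    have he : (mid1[r]).1 = ids[j]'(by omega) := by rw [← hzj']
    rw [hc, hd, he]
    subst hjp
    rfl
  rw [List.getElem_map, List.getElem_map, hidp,
      rank_dict_getD sids hsidsnd r (by omega)]
  have hnat : PySem.List.pyGetD ssal ((r : Nat) : Int) 0 = ssal.getD r 0 := by
    simp [PySem.List.pyGetD_natCast]
  rw [hnat, List.getD_eq_getElem ssal 0 (by omega)]
  rw [show (mid3[p]).2 = ssal[r] by rw [← hzr']]

theorem SynchronizingTables_spec : Claim_equal_SynchronizingTables := by
  intro N ids salary _hdom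
  unfold Spec_SynchronizingTables SynchronizingTables SynchronizingTables_alt
  by_cases hC : 0 ≤ N ∧ N = PySem.List.len ids ∧ PySem.List.len ids = PySem.List.len salary
      ∧ List.Pairwise (· ≠ ·) ids ∧ (∀ x ∈ ids, 0 ≤ x) ∧ (∀ x ∈ salary, 0 ≤ x)
  · rw [if_pos hC]
    obtain ⟨h0, h1, h2, h3, h4, h5⟩ := hC
    rw [if_neg (not_not_intro ⟨h0, h1, h1.trans h2⟩)]
    rw [if_neg (not_not_intro ((ofList_length_iff ids).mpr h3))]
    rw [if_neg (by
      simp only [Bool.or_eq_true, List.any_eq_true, not_or, not_exists]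
      constructor
      · rintro x ⟨hx, hlt⟩
        simp only [decide_eq_true_eq] at hlt
        exact absurd (h4 x hx) (not_le.mpr hlt)
      · rintro x ⟨hx, hlt⟩
        simp only [decide_eq_true_eq] at hlt
        exact absurd (h5 x hx) (not_le.mpr hlt))]
    exact congrArg some (valid_case N ids salary h1 h2 h3)
  · rw [if_neg hC]
    by_cases h1 : 0 ≤ N ∧ N = PySem.List.len ids ∧ N = PySem.List.len salary
    · rw [if_neg (not_not_intro h1)]
      by_cases h2 : (PySem.Set.ofList ids).length = ids.length
      · rw [if_neg (not_not_intro h2)]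
        by_cases h3 : (ids.any (fun x => decide (x < 0)) || salary.any (fun x => decide (x < 0))) = true
        · rw [if_pos h3]
        · rw [if_neg h3]
          exfalso
          apply hC
          obtain ⟨g0, g1, g2⟩ := h1
          simp only [Bool.or_eq_true, List.any_eq_true, not_or, not_exists] at h3
          obtain ⟨t1, t2⟩ := h3
          refine ⟨g0, g1, g1.symm.trans g2 ▸ rfl, (ofList_length_iff ids).mp h2, ?_, ?_⟩
          · intro x hx
            have := t1 x
            simp only [hx, true_and, decide_eq_true_eq, not_lt] at this
            exact this
          · intro x hx
            have := t2 x
            simp only [hx, true_and, decide_eq_true_eq, not_lt] at this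
            exact this
      · rw [if_pos h2]
    · rw [if_pos h1]
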